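-- pv_equiv track=rewrite | github.com/ryuikaneko/cluster_mean_field | square__transverse_field_ising/ed_j1j2j3.py | make_num_mf2
-- ===== SOURCE A (Python) =====
-- def make_num_mf2(Lx,Ly):
--     list_num_mf2 = []
--     dist = 1
--     for y in range(Ly):
--         for x in range(Lx):
--             cnt = 0
--             if x+dist >= Lx or y+dist >= Ly:
--                 cnt += 1
--             if x+dist >= Lx or y-dist <= -1:
--                 cnt += 1
--             if x-dist <= -1 or y+dist >= Ly:
--                 cnt += 1
--             if x-dist <= -1 or y-dist <= -1:
--                 cnt += 1
--             list_num_mf2.append(cnt)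
--     return list_num_mf2
-- ===== SOURCE B (Python) =====
-- def make_num_mf2(Lx, Ly):
--     if Lx <= 0 or Ly <= 0:
--         return []
--     # precompute per-axis boundary counts, then combine by closed form
--     xs = [(x == 0) + (x == Lx - 1) for x in range(Lx)]
--     ys = [(y == 0) + (y == Ly - 1) for y in range(Ly)]
--     return [2 * X + 2 * Y - X * Y for Y in ys for X in xs]
-- ===== Notes on version B (the rewrite author's own statement) =====
-- stated objective: simpler
-- what changed: Replaces the four OR-based conditional increments per site by precomputed per-axis boundary counts X,Y combined with the closed form 2X+2Y-XY (from [a or b] = a+b-ab), built as a comprehension over the two precomputed axis lists.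
import Mathlib
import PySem

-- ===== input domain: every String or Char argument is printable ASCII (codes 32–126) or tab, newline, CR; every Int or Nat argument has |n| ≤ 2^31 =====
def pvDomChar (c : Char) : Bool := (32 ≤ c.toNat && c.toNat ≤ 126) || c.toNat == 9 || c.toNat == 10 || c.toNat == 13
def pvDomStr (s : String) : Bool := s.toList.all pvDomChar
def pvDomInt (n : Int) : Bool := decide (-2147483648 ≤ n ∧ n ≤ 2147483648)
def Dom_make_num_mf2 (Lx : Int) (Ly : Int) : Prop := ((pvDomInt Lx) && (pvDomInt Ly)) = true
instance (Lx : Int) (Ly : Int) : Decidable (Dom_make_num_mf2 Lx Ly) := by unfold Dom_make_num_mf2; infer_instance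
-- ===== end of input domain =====

-- B replaces A's four OR-based conditional increments by precomputed per-axis
-- boundary counts combined with the closed form 2X+2Y-XY (objective: simpler).

-- ===== PORT A =====
def make_num_mf2 (Lx : Int) (Ly : Int) : List Int :=
  let dist : Int := 1
  (PySem.List.pyRange 0 Ly 1).foldl (fun acc y =>
    (PySem.List.pyRange 0 Lx 1).foldl (fun acc x =>
      let cnt : Int := 0
      let cnt := if x + dist ≥ Lx ∨ y + dist ≥ Ly then cnt + 1 else cnt
      let cnt := if x + dist ≥ Lx ∨ y - dist ≤ -1 then cnt + 1 else cnt
      let cnt := if x - dist ≤ -1 ∨ y + dist ≥ Ly then cnt + 1 else cnt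
      let cnt := if x - dist ≤ -1 ∨ y - dist ≤ -1 then cnt + 1 else cnt
      acc ++ [cnt]) acc) []

-- ===== PORT B =====
def make_num_mf2_alt (Lx : Int) (Ly : Int) : List Int :=
  if Lx ≤ 0 ∨ Ly ≤ 0 then [] else
  let xs := (PySem.List.pyRange 0 Lx 1).map (fun x =>
    (if x = 0 then (1 : Int) else 0) + (if x = Lx - 1 then 1 else 0))
  let ys := (PySem.List.pyRange 0 Ly 1).map (fun y =>
    (if y = 0 then (1 : Int) else 0) + (if y = Ly - 1 then 1 else 0))
  ys.flatMap (fun Y => xs.map (fun X => 2 * X + 2 * Y - X * Y))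

-- ===== PRECONDITION & SPEC =====
def Spec_make_num_mf2 (Lx : Int) (Ly : Int) (out : List Int) : Prop := out = make_num_mf2_alt Lx Ly
instance (Lx : Int) (Ly : Int) (out : List Int) : Decidable (Spec_make_num_mf2 Lx Ly out) := by unfold Spec_make_num_mf2; infer_instance

-- ===== CLAIM (what is proved, stated in full; the proofs are below) =====
def Claim_equal_make_num_mf2 : Prop := ∀ (Lx : Int) (Ly : Int), Dom_make_num_mf2 Lx Ly → Spec_make_num_mf2 Lx Ly (make_num_mf2 Lx Ly)

-- ===== LEMMAS AND PROOFS =====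

-- A's per-site count equals B's closed form, for in-range x,y.
lemma cell_eq (Lx Ly x y : Int) (hx0 : 0 ≤ x) (hx : x < Lx) (hy0 : 0 ≤ y) (hy : y < Ly) :
    (let cnt : Int := 0
     let cnt := if x + 1 ≥ Lx ∨ y + 1 ≥ Ly then cnt + 1 else cnt
     let cnt := if x + 1 ≥ Lx ∨ y - 1 ≤ -1 then cnt + 1 else cnt
     let cnt := if x - 1 ≤ -1 ∨ y + 1 ≥ Ly then cnt + 1 else cnt
     let cnt := if x - 1 ≤ -1 ∨ y - 1 ≤ -1 then cnt + 1 else cnt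
     cnt) =
    (2 * ((if x = 0 then (1 : Int) else 0) + (if x = Lx - 1 then 1 else 0)) +
     2 * ((if y = 0 then (1 : Int) else 0) + (if y = Ly - 1 then 1 else 0)) -
     ((if x = 0 then (1 : Int) else 0) + (if x = Lx - 1 then 1 else 0)) *
     ((if y = 0 then (1 : Int) else 0) + (if y = Ly - 1 then 1 else 0))) := by
  simp only []
  split_ifs <;> omega

-- Inner foldl of A is acc ++ map of the per-site body over the x-range.
lemma inner_eq (Lx Ly y : Int) (acc : List Int) :
    (PySem.List.pyRange 0 Lx 1).foldl (fun acc x =>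
      let cnt : Int := 0
      let cnt := if x + 1 ≥ Lx ∨ y + 1 ≥ Ly then cnt + 1 else cnt
      let cnt := if x + 1 ≥ Lx ∨ y - 1 ≤ -1 then cnt + 1 else cnt
      let cnt := if x - 1 ≤ -1 ∨ y + 1 ≥ Ly then cnt + 1 else cnt
      let cnt := if x - 1 ≤ -1 ∨ y - 1 ≤ -1 then cnt + 1 else cnt
      acc ++ [cnt]) acc
    = acc ++ (PySem.List.pyRange 0 Lx 1).map (fun x =>
      let cnt : Int := 0
      let cnt := if x + 1 ≥ Lx ∨ y + 1 ≥ Ly then cnt + 1 else cnt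
      let cnt := if x + 1 ≥ Lx ∨ y - 1 ≤ -1 then cnt + 1 else cnt
      let cnt := if x - 1 ≤ -1 ∨ y + 1 ≥ Ly then cnt + 1 else cnt
      let cnt := if x - 1 ≤ -1 ∨ y - 1 ≤ -1 then cnt + 1 else cnt
      cnt) :=
  PySem.List.foldl_append_singleton_eq_map _ _ _

-- ===== VERDICT (by name: the statement is the Claim_ definition above) =====
theorem make_num_mf2_spec : Claim_equal_make_num_mf2 := by
  intro Lx Ly _
  unfold Spec_make_num_mf2 make_num_mf2 make_num_mf2_alt
  by_cases htriv : Lx ≤ 0 ∨ Ly ≤ 0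
  · rw [if_pos htriv]
    rcases htriv with h | h
    · rw [PySem.List.pyRange_one_eq_nil h]
      simp [List.foldl_fixed]
    · rw [PySem.List.pyRange_one_eq_nil h]
      simp
  rw [if_neg htriv]
  simp only []
  -- turn A's outer foldl-of-appends into a flatMap
  have houter :
      ∀ (ys : List Int) (acc : List Int),
        ys.foldl (fun acc y =>
          (PySem.List.pyRange 0 Lx 1).foldl (fun acc x =>
            let cnt : Int := 0
            let cnt := if x + 1 ≥ Lx ∨ y + 1 ≥ Ly then cnt + 1 else cnt
            let cnt := if x + 1 ≥ Lx ∨ y - 1 ≤ -1 then cnt + 1 else cnt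
            let cnt := if x - 1 ≤ -1 ∨ y + 1 ≥ Ly then cnt + 1 else cnt
            let cnt := if x - 1 ≤ -1 ∨ y - 1 ≤ -1 then cnt + 1 else cnt
            acc ++ [cnt]) acc) acc
        = acc ++ ys.flatMap (fun y => (PySem.List.pyRange 0 Lx 1).map (fun x =>
            let cnt : Int := 0
            let cnt := if x + 1 ≥ Lx ∨ y + 1 ≥ Ly then cnt + 1 else cnt
            let cnt := if x + 1 ≥ Lx ∨ y - 1 ≤ -1 then cnt + 1 else cnt
            let cnt := if x - 1 ≤ -1 ∨ y + 1 ≥ Ly then cnt + 1 else cnt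
            let cnt := if x - 1 ≤ -1 ∨ y - 1 ≤ -1 then cnt + 1 else cnt
            cnt)) := by
    intro ys
    induction ys with
    | nil => intro acc; simp
    | cons y ys ih =>
      intro acc
      simp only [List.foldl_cons, List.flatMap_cons]
      rw [inner_eq, ih, List.append_assoc]
  rw [houter]
  simp only [List.nil_append, List.flatMap_map]
  apply List.flatMap_congr
  intro y hy
  obtain ⟨hy0, hyb⟩ := PySem.List.mem_pyRange_one.mp hy
  rw [List.map_map]
  apply List.map_congr_left
  intro x hx
  obtain ⟨hx0, hxb⟩ := PySem.List.mem_pyRange_one.mp hx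
  have := cell_eq Lx Ly x y hx0 hxb hy0 hyb
  simpa using this
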